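-- pv_equiv track=rewrite | github.com/plasmashen/lujiachun | game/catch_bad_guy_expected_value.py | get_bad_prize
-- ===== SOURCE A (Python) =====
-- PRIZES_BAD = {
--     3: 150, 4: 300, 5: 400
-- }
--
-- def get_bad_prize(bad_count):
--     if bad_count < 3:
--         return 0  # 1-2 个坏仔，0 元
--     best = 0
--     for bc, prize in PRIZES_BAD.items():
--         if bc <= bad_count:
--             best = max(best, prize)
--     return best
-- ===== SOURCE B (Python) =====
-- def get_bad_prize(bad_count):
--     if bad_count < 3:
--         return 0
--     if bad_count < 4:
--         return 150
--     if bad_count < 5: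
--         return 300
--     return 400
-- ===== Notes on version B (the rewrite author's own statement) =====
-- stated objective: simpler
-- what changed: Replaces the dict scan with a running max by a direct threshold cascade of three comparisons returning the prize constant for the bracket.
import Mathlib
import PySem

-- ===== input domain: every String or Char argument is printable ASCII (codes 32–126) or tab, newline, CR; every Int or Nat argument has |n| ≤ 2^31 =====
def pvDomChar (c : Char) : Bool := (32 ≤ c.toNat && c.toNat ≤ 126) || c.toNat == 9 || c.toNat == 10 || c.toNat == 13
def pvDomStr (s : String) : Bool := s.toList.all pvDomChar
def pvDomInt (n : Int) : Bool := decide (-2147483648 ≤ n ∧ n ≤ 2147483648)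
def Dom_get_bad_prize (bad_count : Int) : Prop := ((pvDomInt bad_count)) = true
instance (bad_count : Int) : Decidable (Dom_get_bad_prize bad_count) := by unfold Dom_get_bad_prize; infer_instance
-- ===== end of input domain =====

-- B replaces A's scan of the prize table with a direct threshold cascade (objective: simpler).

-- ===== PORT A =====
-- module-level dict PRIZES_BAD = {3:150, 4:300, 5:400}, in insertion order
def PRIZES_BAD : PySem.Dict Int Int :=
  ((PySem.Dict.empty.insert 3 150).insert 4 300).insert 5 400

def get_bad_prize (bad_count : Int) : Int :=
  if bad_count < 3 then 0
  else
    (PRIZES_BAD.items).foldl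
      (fun best bp => if bp.1 ≤ bad_count then max best bp.2 else best) 0

-- ===== PORT B =====
def get_bad_prize_alt (bad_count : Int) : Int :=
  if bad_count < 3 then 0
  else if bad_count < 4 then 150
  else if bad_count < 5 then 300
  else 400

-- ===== PRECONDITION & SPEC =====
def Spec_get_bad_prize (bad_count : Int) (out : Int) : Prop := out = get_bad_prize_alt bad_count
instance (bad_count : Int) (out : Int) : Decidable (Spec_get_bad_prize bad_count out) := by unfold Spec_get_bad_prize; infer_instance

-- ===== CLAIM (what is proved, stated in full; the proofs are below) =====
def Claim_equal_get_bad_prize : Prop := ∀ (bad_count : Int), Dom_get_bad_prize bad_count → Spec_get_bad_prize bad_count (get_bad_prize bad_count)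

-- ===== LEMMAS AND PROOFS =====
theorem pv_items : PRIZES_BAD.items = [(3, 150), (4, 300), (5, 400)] := by decide

-- ===== VERDICT (by name: the statement is the Claim_ definition above) =====
theorem get_bad_prize_spec : Claim_equal_get_bad_prize := by
  intro n _
  unfold Spec_get_bad_prize get_bad_prize get_bad_prize_alt
  rw [pv_items]
  simp only [List.foldl]
  split_ifs <;> omega
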